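-- pv_equiv track=rewrite | github.com/ChrisMenning/nature-oracle | inaturalist_module/utils.py | wrap_text_into_slides
-- ===== SOURCE A (Python) =====
-- def wrap_text_into_slides(text, max_chars=30, max_lines_per_slide=8):
--     """Wrap text to max_chars per line, split into slides if > max_lines_per_slide."""
--     paragraphs = text.split("\n")
--     wrapped_lines = []
--
--     for para in paragraphs:
--         words = para.split()
--         current_line = []
--         current_len = 0
--         for word in words:
--             if current_len + len(word) + (1 if current_line else 0) > max_chars:
--                 wrapped_lines.append(" ".join(current_line))
--                 current_line = [word]
--                 current_len = len(word)
--             else: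
--                 current_line.append(word)
--                 current_len += len(word) + (1 if current_line else 0)
--         if current_line:
--             wrapped_lines.append(" ".join(current_line))
--         if not para.strip():
--             wrapped_lines.append("")
--
--     slides = []
--     for i in range(0, len(wrapped_lines), max_lines_per_slide):
--         slides.append("\n".join(wrapped_lines[i:i + max_lines_per_slide]))
--     return slides
-- ===== SOURCE B (Python) =====
-- def wrap_text_into_slides(text, max_chars=30, max_lines_per_slide=8):
--     """Wrap text to max_chars per line, split into slides if > max_lines_per_slide.
--
--     Single streaming pass: wrapped lines go straight into a slide buffer that
--     is flushed whenever it reaches max_lines_per_slide lines, instead of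
--     collecting every line first and slicing the list afterwards.
--     """
--     slides = []
--     buf = []
--
--     def add_line(line):
--         buf.append(line)
--         if len(buf) == max_lines_per_slide:
--             slides.append("\n".join(buf))
--             buf.clear()
--
--     for para in text.split("\n"):
--         for line in _wrap_paragraph(para, max_chars):
--             add_line(line)
--
--     if buf:
--         slides.append("\n".join(buf))
--     return slides
--
--
-- def _wrap_paragraph(para, max_chars):
--     """Greedy word wrap of one paragraph; a blank paragraph yields one empty line."""
--     lines = []
--     current_line = []
--     current_len = 0
--     for word in para.split():
--         if current_len + len(word) + (1 if current_line else 0) > max_chars: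
--             lines.append(" ".join(current_line))
--             current_line = [word]
--             current_len = len(word)
--         else:
--             current_line.append(word)
--             current_len += len(word) + 1
--     if current_line:
--         lines.append(" ".join(current_line))
--     if not para.strip():
--         lines.append("")
--     return lines
-- ===== Notes on version B (the rewrite author's own statement) =====
-- stated objective: alternative
-- what changed: B factors the greedy word wrap into a per-paragraph helper and streams each wrapped line straight into a slide buffer flushed whenever it reaches max_lines_per_slide (single fused pass with a final flush), instead of A's collect-all-lines list followed by a separate range/slice chunking loop; Pre_ excludes max_lines_per_slide < 1, where A raises (step 0) or returns [] as an artefact of range's empty negative-step iteration.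
-- outside the precondition, e.g. on wrap_text_into_slides('hi', 5, -1): A returns [], B returns ['hi']; on wrap_text_into_slides('hi', 5, 0): A raises ValueError, B returns ['hi']
import Mathlib
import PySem

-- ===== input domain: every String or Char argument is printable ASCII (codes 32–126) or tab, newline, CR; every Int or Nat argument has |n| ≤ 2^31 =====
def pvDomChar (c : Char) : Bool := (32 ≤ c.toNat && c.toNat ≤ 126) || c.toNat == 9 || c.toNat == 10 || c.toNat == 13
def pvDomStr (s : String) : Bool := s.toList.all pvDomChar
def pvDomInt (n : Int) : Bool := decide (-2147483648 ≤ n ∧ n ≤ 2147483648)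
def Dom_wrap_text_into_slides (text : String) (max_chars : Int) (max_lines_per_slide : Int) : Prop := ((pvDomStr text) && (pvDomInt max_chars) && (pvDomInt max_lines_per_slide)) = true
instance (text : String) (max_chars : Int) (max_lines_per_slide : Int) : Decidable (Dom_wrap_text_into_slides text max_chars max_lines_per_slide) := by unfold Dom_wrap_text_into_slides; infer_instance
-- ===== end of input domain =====

-- B streams each wrapped line (produced by a per-paragraph wrap helper) straight into a slide
-- buffer flushed at max_lines_per_slide, instead of collecting all lines and slicing afterwards.

-- ===== PORT A =====
-- inner word loop of A: state = (wrapped_lines, current_line, current_len)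
def pvAStep (max_chars : Int) (st : List String × List String × Int) (word : String) :
    List String × List String × Int :=
  if st.2.2 + PySem.Str.len word + (if st.2.1 ≠ [] then (1 : Int) else 0) > max_chars then
    (st.1 ++ [PySem.Str.join " " st.2.1], [word], PySem.Str.len word)
  else
    let current_line := st.2.1 ++ [word]
    (st.1, current_line, st.2.2 + PySem.Str.len word + (if current_line ≠ [] then (1 : Int) else 0))

-- body of A's paragraph loop
def pvAPara (max_chars : Int) (wrapped_lines : List String) (para : String) : List String :=
  let words := PySem.Str.split₀ para
  let st := words.foldl (pvAStep max_chars) (wrapped_lines, [], 0)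
  let wl := if st.2.1 ≠ [] then st.1 ++ [PySem.Str.join " " st.2.1] else st.1
  if PySem.Str.strip para = "" then wl ++ [""] else wl

def wrap_text_into_slides (text : String) (max_chars : Int) (max_lines_per_slide : Int) : List String :=
  let paragraphs := (PySem.Str.split? text "\n").getD []
  let wrapped_lines := paragraphs.foldl (pvAPara max_chars) []
  (PySem.List.pyRange 0 (wrapped_lines.length : Int) max_lines_per_slide).foldl
    (fun slides i =>
      slides ++ [PySem.Str.join "\n" (PySem.List.slice wrapped_lines (some i) (some (i + max_lines_per_slide)))])
    []

-- ===== PORT B =====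
-- Source B's _wrap_paragraph inner loop: state = (lines, current_line, current_len)
def pvWrapStep (max_chars : Int) (st : List String × List String × Int) (word : String) :
    List String × List String × Int :=
  if st.2.2 + PySem.Str.len word + (if st.2.1 ≠ [] then (1 : Int) else 0) > max_chars then
    (st.1 ++ [PySem.Str.join " " st.2.1], [word], PySem.Str.len word)
  else
    (st.1, st.2.1 ++ [word], st.2.2 + PySem.Str.len word + 1)

-- Source B's _wrap_paragraph
def pvWrapParagraph (para : String) (max_chars : Int) : List String :=
  let st := (PySem.Str.split₀ para).foldl (pvWrapStep max_chars) ([], [], 0)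
  let lines := if st.2.1 ≠ [] then st.1 ++ [PySem.Str.join " " st.2.1] else st.1
  if PySem.Str.strip para = "" then lines ++ [""] else lines

-- Source B's add_line: state = (slides, buf); flush when the buffer reaches max_lines_per_slide
def pvAddLine (max_lines_per_slide : Int) (st : List String × List String) (line : String) :
    List String × List String :=
  let buf := st.2 ++ [line]
  if (buf.length : Int) = max_lines_per_slide then (st.1 ++ [PySem.Str.join "\n" buf], [])
  else (st.1, buf)

def wrap_text_into_slides_alt (text : String) (max_chars : Int) (max_lines_per_slide : Int) : List String :=
  let st := ((PySem.Str.split? text "\n").getD []).foldl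
    (fun st para => (pvWrapParagraph para max_chars).foldl (pvAddLine max_lines_per_slide) st)
    ([], [])
  if st.2 ≠ [] then st.1 ++ [PySem.Str.join "\n" st.2] else st.1

-- ===== PRECONDITION & SPEC =====
-- Pre_ restricts to the natural domain max_lines_per_slide ≥ 1: at 0 Python A raises
-- ValueError (range step 0), and for negative values A returns [] whatever the text —
-- an artefact of range's empty negative-step iteration, not a specified behaviour.
def Pre_wrap_text_into_slides (text : String) (max_chars : Int) (max_lines_per_slide : Int) : Prop :=
  1 ≤ max_lines_per_slide
instance (text : String) (max_chars : Int) (max_lines_per_slide : Int) : Decidable (Pre_wrap_text_into_slides text max_chars max_lines_per_slide) := by unfold Pre_wrap_text_into_slides; infer_instance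

def pvWitness_wrap_text_into_slides : String × Int × Int := ("hello world wrap me", 7, 2)

def Spec_wrap_text_into_slides (text : String) (max_chars : Int) (max_lines_per_slide : Int) (out : List String) : Prop := out = wrap_text_into_slides_alt text max_chars max_lines_per_slide
instance (text : String) (max_chars : Int) (max_lines_per_slide : Int) (out : List String) : Decidable (Spec_wrap_text_into_slides text max_chars max_lines_per_slide out) := by unfold Spec_wrap_text_into_slides; infer_instance

-- ===== CLAIM (what is proved, stated in full; the proofs are below) =====
def Claim_equal_wrap_text_into_slides : Prop := ∀ (text : String) (max_chars : Int) (max_lines_per_slide : Int), Dom_wrap_text_into_slides text max_chars max_lines_per_slide → Pre_wrap_text_into_slides text max_chars max_lines_per_slide → Spec_wrap_text_into_slides text max_chars max_lines_per_slide (wrap_text_into_slides text max_chars max_lines_per_slide)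

-- ===== LEMMAS AND PROOFS =====

-- B's wrap step is A's wrap step (A's `current_line` is nonempty right after the append)
theorem pvWrapStep_eq (mc : Int) : pvWrapStep mc = pvAStep mc := by
  funext st w
  unfold pvWrapStep pvAStep
  split_ifs <;> simp_all

theorem pvWrapParagraph_eq (mc : Int) (para : String) :
    pvWrapParagraph para mc = pvAPara mc [] para := by
  unfold pvWrapParagraph pvAPara
  rw [pvWrapStep_eq]

-- generic shift lemma: a fold whose step only appends to the first component
theorem pvFoldShift {σ β : Type} (d : σ → β → List String) (t : σ → β → σ) :
    ∀ (ws : List β) (wl : List String) (s : σ),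
    List.foldl (fun st b => (st.1 ++ d st.2 b, t st.2 b)) (wl, s) ws =
      ((wl ++ (List.foldl (fun st b => (st.1 ++ d st.2 b, t st.2 b)) ([], s) ws).1),
       (List.foldl (fun st b => (st.1 ++ d st.2 b, t st.2 b)) ([], s) ws).2)
  | [], wl, s => by simp
  | w :: ws, wl, s => by
      simp only [List.foldl_cons]
      rw [pvFoldShift d t ws (wl ++ d s w) (t s w), pvFoldShift d t ws ([] ++ d s w) (t s w)]
      simp [List.append_assoc]

def pvAEmit (mc : Int) (s : List String × Int) (w : String) : List String :=
  if s.2 + PySem.Str.len w + (if s.1 ≠ [] then (1 : Int) else 0) > mc then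
    [PySem.Str.join " " s.1] else []

def pvANext (mc : Int) (s : List String × Int) (w : String) : List String × Int :=
  if s.2 + PySem.Str.len w + (if s.1 ≠ [] then (1 : Int) else 0) > mc then
    ([w], PySem.Str.len w)
  else
    (s.1 ++ [w], s.2 + PySem.Str.len w + (if s.1 ++ [w] ≠ [] then (1 : Int) else 0))

theorem pvAStep_eq (mc : Int) :
    pvAStep mc = fun st b => (st.1 ++ pvAEmit mc st.2 b, pvANext mc st.2 b) := by
  funext st b
  unfold pvAStep pvAEmit pvANext
  split_ifs <;> simp_all

theorem pvAShift (mc : Int) (ws : List String) (wl cur : List String) (n : Int) :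
    List.foldl (pvAStep mc) (wl, cur, n) ws =
      ((wl ++ (List.foldl (pvAStep mc) ([], cur, n) ws).1),
       (List.foldl (pvAStep mc) ([], cur, n) ws).2) := by
  rw [pvAStep_eq]
  exact pvFoldShift (pvAEmit mc) (pvANext mc) ws wl (cur, n)

theorem pvAPara_eq (mc : Int) (wl : List String) (para : String) :
    pvAPara mc wl para =
      (if (List.foldl (pvAStep mc) (wl, [], 0) (PySem.Str.split₀ para)).2.1 ≠ []
        then (List.foldl (pvAStep mc) (wl, [], 0) (PySem.Str.split₀ para)).1
          ++ [PySem.Str.join " " (List.foldl (pvAStep mc) (wl, [], 0) (PySem.Str.split₀ para)).2.1]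
        else (List.foldl (pvAStep mc) (wl, [], 0) (PySem.Str.split₀ para)).1)
      ++ (if PySem.Str.strip para = "" then [""] else []) := by
  unfold pvAPara
  split_ifs <;> simp_all

theorem pvAParaShift (mc : Int) (wl : List String) (para : String) :
    pvAPara mc wl para = wl ++ pvAPara mc [] para := by
  rw [pvAPara_eq, pvAPara_eq, pvAShift mc (PySem.Str.split₀ para) wl [] 0]
  simp only [List.nil_append]
  split_ifs <;> simp [List.append_assoc]

theorem pvAFold (mc : Int) : ∀ (paras : List String) (wl : List String),
    List.foldl (pvAPara mc) wl paras = wl ++ paras.flatMap (pvAPara mc [])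
  | [], wl => by simp
  | p :: ps, wl => by
      simp only [List.foldl_cons, List.flatMap_cons]
      rw [pvAParaShift, pvAFold mc ps (wl ++ pvAPara mc [] p)]
      simp [List.append_assoc]

-- B's nested fold (lines of each paragraph fed to add_line) over the flattened line list
theorem pvBFoldFlat (m : Int) (f : String → List String) :
    ∀ (ps : List String) (S : List String × List String),
    List.foldl (fun st p => List.foldl (pvAddLine m) st (f p)) S ps
      = List.foldl (pvAddLine m) S (ps.flatMap f)
  | [], S => by simp
  | p :: ps, S => by
      simp only [List.foldl_cons, List.flatMap_cons]
      rw [pvBFoldFlat m f ps, List.foldl_append]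

-- slide chunking spec
def pvChunks (mN : Nat) : List String → List String → List String
  | b, [] => if b = [] then [] else [PySem.Str.join "\n" b]
  | b, x :: L =>
      if b.length + 1 = mN then PySem.Str.join "\n" (b ++ [x]) :: pvChunks mN [] L
      else pvChunks mN (b ++ [x]) L

theorem pvAddLineFoldChunks (m : Int) (hm : 1 ≤ m) : ∀ (L : List String) (s b : List String),
    b.length < m.toNat →
    (if (List.foldl (pvAddLine m) (s, b) L).2 ≠ []
      then (List.foldl (pvAddLine m) (s, b) L).1
        ++ [PySem.Str.join "\n" (List.foldl (pvAddLine m) (s, b) L).2]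
      else (List.foldl (pvAddLine m) (s, b) L).1)
      = s ++ pvChunks m.toNat b L
  | [], s, b, hb => by
      unfold pvChunks
      simp only [List.foldl_nil]
      split_ifs with h1 h2 <;> simp_all
  | x :: L, s, b, hb => by
      simp only [List.foldl_cons]
      unfold pvChunks
      by_cases hful : b.length + 1 = m.toNat
      · have hstep : pvAddLine m (s, b) x = (s ++ [PySem.Str.join "\n" (b ++ [x])], []) := by
          unfold pvAddLine
          rw [if_pos (by simp; omega)]
        rw [hstep, if_pos hful,
          pvAddLineFoldChunks m hm L (s ++ [PySem.Str.join "\n" (b ++ [x])]) [] (by simp; omega)]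
        simp
      · have hstep : pvAddLine m (s, b) x = (s, b ++ [x]) := by
          unfold pvAddLine
          rw [if_neg (by simp; omega)]
        rw [hstep, if_neg hful,
          pvAddLineFoldChunks m hm L s (b ++ [x]) (by simp; omega)]

theorem pvChunksEq (mN : Nat) : ∀ (L b : List String), b.length < mN → (b ≠ [] ∨ L ≠ []) →
    pvChunks mN b L = PySem.Str.join "\n" (b ++ L.take (mN - b.length))
      :: pvChunks mN [] (L.drop (mN - b.length))
  | [], b, hb, hne => by
      rcases hne with hne | hne
      · unfold pvChunks
        rw [if_neg hne]
        simp [pvChunks]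
      · exact absurd rfl hne
  | x :: L, b, hb, hne => by
      conv_lhs => unfold pvChunks
      by_cases hful : b.length + 1 = mN
      · rw [if_pos hful]
        have h1 : mN - b.length = 1 := by omega
        rw [h1]
        simp
      · rw [if_neg hful]
        rw [pvChunksEq mN L (b ++ [x]) (by simp; omega) (Or.inl (by simp))]
        have h1 : mN - b.length = (mN - (b ++ [x]).length) + 1 := by simp; omega
        rw [h1]
        simp [List.append_assoc]

theorem pvAChunk (m : Int) (hm : 1 ≤ m) (L : List String) :
    List.foldl
      (fun slides i =>
        slides ++ [PySem.Str.join "\n" (PySem.List.slice L (some i) (some (i + m)))])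
      [] (PySem.List.pyRange 0 (L.length : Int) m)
      = pvChunks m.toNat [] L := by
  rw [PySem.List.foldl_append_singleton_eq_map, List.nil_append]
  by_cases hL : L = []
  · subst hL
    simp [PySem.List.pyRange_of_pos 0 0 (by omega : (0:Int) < m), pvChunks]
  · have hn : 0 < (L.length : Int) := by
      simp [List.length_pos_iff]
      exact hL
    have hmN : ((m.toNat : Int)) = m := Int.toNat_of_nonneg (by omega)
    set n := (L.length : Int) with hdefn
    rw [PySem.List.pyRange_of_pos 0 n (by omega)]
    have hq : (n - 0 + m - 1) / m = (n - 1) / m + 1 := by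
      rw [show n - 0 + m - 1 = (n - 1) + 1 * m by ring, Int.add_mul_ediv_right _ _ (by omega)]
    have hq0 : 0 ≤ (n - 1) / m := Int.ediv_nonneg (by omega) (by omega)
    have hcount : ((if (0:Int) < n then ((n - 0 + m - 1) / m).toNat else 0))
        = ((n - 1) / m).toNat + 1 := by
      rw [if_pos hn, hq]
      omega
    rw [hcount, List.map_map, List.range_succ_eq_map, List.map_cons, List.map_map]
    -- head slide
    have hhead : ((fun i => PySem.Str.join "\n" (PySem.List.slice L (some i) (some (i + m)))) ∘
          fun k : Nat => 0 + m * (k : Int)) 0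
        = PySem.Str.join "\n" (L.take m.toNat) := by
      simp only [Function.comp]
      norm_num
      rw [PySem.List.slice_to L (by omega)]
    rw [hhead]
    -- spec side
    rw [pvChunksEq m.toNat L [] (by simp; omega) (Or.inr hL)]
    simp only [List.nil_append, List.length_nil, Nat.sub_zero]
    congr 1
    -- tail slides
    rw [← pvAChunk m hm (L.drop m.toNat)]
    rw [PySem.List.foldl_append_singleton_eq_map, List.nil_append]
    by_cases hsmall : L.length ≤ m.toNat
    · have hdrop : L.drop m.toNat = [] := by
        rw [List.drop_eq_nil_iff]
        omega
      have hc0 : ((n - 1) / m).toNat = 0 := by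
        rw [Int.ediv_eq_zero_of_lt (by omega) (by omega)]
        rfl
      rw [hdrop, hc0]
      simp [PySem.List.pyRange_of_pos 0 0 (by omega : (0:Int) < m)]
    · have hlen' : ((L.drop m.toNat).length : Int) = n - m := by
        rw [List.length_drop]
        omega
      have hn' : (0:Int) < n - m := by
        rw [List.length_drop] at hlen'
        omega
      rw [hlen', PySem.List.pyRange_of_pos 0 (n - m) (by omega), List.map_map]
      have hc2 : (if (0:Int) < n - m then ((n - m - 0 + m - 1) / m).toNat else 0)
          = ((n - 1) / m).toNat := by
        rw [if_pos hn', show n - m - 0 + m - 1 = n - 1 by ring]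
      rw [hc2]
      apply List.map_congr_left
      intro k _
      simp only [Function.comp]
      have hcast1 : (0:Int) + m * ((Nat.succ k : Nat) : Int) = ((m.toNat * (k + 1) : Nat) : Int) := by
        push_cast
        rw [hmN]
        ring
      have hcast2 : (0:Int) + m * ((k : Nat) : Int) = ((m.toNat * k : Nat) : Int) := by
        push_cast
        rw [hmN]
        ring
      rw [hcast1, hcast2]
      rw [show ((m.toNat * (k + 1) : Nat) : Int) + m = ((m.toNat * (k + 1) : Nat) : Int) + ((m.toNat : Nat) : Int) by rw [hmN],
        show ((m.toNat * k : Nat) : Int) + m = ((m.toNat * k : Nat) : Int) + ((m.toNat : Nat) : Int) by rw [hmN]]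
      rw [PySem.List.slice_natCast_add, PySem.List.slice_natCast_add]
      rw [List.drop_drop]
      congr 2
      ring
termination_by L.length
decreasing_by
  have h1 : 0 < L.length := List.length_pos_iff.mpr hL
  simp [List.length_drop]
  omega

-- ===== VERDICT (by name: the statement is the Claim_ definition above) =====
theorem wrap_text_into_slides_spec : Claim_equal_wrap_text_into_slides := by
  intro text mc mls _ hpre
  have hm : (1:Int) ≤ mls := hpre
  unfold Spec_wrap_text_into_slides
  show wrap_text_into_slides text mc mls = wrap_text_into_slides_alt text mc mls
  set paras := (PySem.Str.split? text "\n").getD [] with hp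
  have hA : wrap_text_into_slides text mc mls =
      List.foldl
        (fun slides i => slides ++
          [PySem.Str.join "\n" (PySem.List.slice (List.foldl (pvAPara mc) [] paras) (some i)
            (some (i + mls)))])
        [] (PySem.List.pyRange 0 ((List.foldl (pvAPara mc) [] paras).length : Int) mls) := rfl
  have hB : wrap_text_into_slides_alt text mc mls =
      (if (List.foldl (fun st para => List.foldl (pvAddLine mls) st (pvWrapParagraph para mc))
            ([], []) paras).2 ≠ []
        then (List.foldl (fun st para => List.foldl (pvAddLine mls) st (pvWrapParagraph para mc))
            ([], []) paras).1
          ++ [PySem.Str.join "\n"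
              (List.foldl (fun st para => List.foldl (pvAddLine mls) st (pvWrapParagraph para mc))
                ([], []) paras).2]
        else (List.foldl (fun st para => List.foldl (pvAddLine mls) st (pvWrapParagraph para mc))
            ([], []) paras).1) := rfl
  have hwrap : (fun st para => List.foldl (pvAddLine mls) st (pvWrapParagraph para mc))
      = fun st para => List.foldl (pvAddLine mls) st (pvAPara mc [] para) := by
    funext st para
    rw [pvWrapParagraph_eq]
  rw [hA, hB, hwrap, pvAFold mc paras [], List.nil_append, pvAChunk mls hm,
    pvBFoldFlat mls (pvAPara mc []) paras ([], []),
    pvAddLineFoldChunks mls hm (paras.flatMap (pvAPara mc [])) [] [] (by simp; omega),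
    List.nil_append]
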